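-- pv_equiv track=rewrite | github.com/ericjardon/python-coding-problems | challenges/unsolved/lego_blocks.py | count_ways_memo
-- ===== SOURCE A (Python) =====
-- def count_ways_memo(width, memo):
--     '''Memoized count_ways'''
--     if memo is None:
--         memo = {}
--
--     if width not in memo:
--         if width<0:
--             return
--         if width ==0:
--             return 1
--
--         ans = 0
--         for brick in range(1, min(5, width+1)):
--             ans += count_ways_memo(width-brick, memo)
--
--         memo[width] = ans
--
--     return memo[width]
-- ===== SOURCE B (Python) =====
-- def count_ways_memo(width, memo):
--     '''Bottom-up iterative DP (no recursion); return value only -- does not mutate memo like A does.'''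
--     if memo is None:
--         memo = {}
--     if width in memo:
--         return memo[width]
--     if width < 0:
--         return None
--     vals = []
--     for w in range(width + 1):
--         if w in memo:
--             v = memo[w]
--         elif w == 0:
--             v = 1
--         else:
--             v = sum(vals[w - b] for b in range(1, min(5, w + 1)))
--         vals.append(v)
--     return vals[width]
-- ===== Notes on version B (the rewrite author's own statement) =====
-- stated objective: alternative
-- what changed: Replaces A's top-down memoized recursion (which mutates the caller's memo dict in place) by an iterative bottom-up DP table built in one pass from 0 to width; B does not recurse (so it cannot hit Python's recursion limit) and does not mutate its arguments.
-- outside the precondition, e.g. on count_ways_memo(900, {896: 0, 897: 0, 898: 0, 899: 0}): A returns 0, B returns 0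
import Mathlib
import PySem

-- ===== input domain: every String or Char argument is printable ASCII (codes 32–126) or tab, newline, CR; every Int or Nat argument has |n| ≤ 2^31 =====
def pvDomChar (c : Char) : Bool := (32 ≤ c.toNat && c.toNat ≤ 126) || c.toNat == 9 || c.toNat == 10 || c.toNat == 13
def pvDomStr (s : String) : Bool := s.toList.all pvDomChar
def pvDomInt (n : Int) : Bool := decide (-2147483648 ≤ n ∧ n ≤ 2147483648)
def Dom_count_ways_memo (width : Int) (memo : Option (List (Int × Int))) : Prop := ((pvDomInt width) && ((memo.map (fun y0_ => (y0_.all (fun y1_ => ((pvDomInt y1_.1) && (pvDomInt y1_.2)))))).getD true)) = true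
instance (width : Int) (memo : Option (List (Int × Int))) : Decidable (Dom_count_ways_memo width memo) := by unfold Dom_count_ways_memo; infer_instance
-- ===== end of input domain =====

-- B replaces A's top-down memoized recursion by a bottom-up iterative DP table (objective:
-- alternative / avoids recursion). Equivalence is about the RETURN value only: A mutates the
-- caller's memo dict in place, B does not.

-- ===== PORT A =====
-- A's recursive calls happen inside the `for brick in range(...)` loop; that loop is the
-- mutual helper pvLoopA, threading (ans, memo) exactly as Python does.
mutual
def pvGoA (w : Int) (memo : PySem.Dict Int Int) : Option Int × PySem.Dict Int Int :=
  if (memo.get? w).isSome then (memo.get? w, memo)          -- `if width not in memo` … `return memo[width]`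
  else if w < 0 then (none, memo)                           -- `return` (None)
  else if w = 0 then (some 1, memo)                         -- `return 1`
  else
    let p := pvLoopA w (PySem.List.pyRange 1 (min 5 (w + 1)) 1) 0 memo
    let memo' := p.2.insert w p.1                            -- `memo[width] = ans`
    (memo'.get? w, memo')                                    -- `return memo[width]`
termination_by (w.toNat, 5)
decreasing_by
  · apply Prod.Lex.right
    simp only [PySem.List.length_pyRange_one]
    omega

def pvLoopA (w : Int) (bricks : List Int) (ans : Int) (memo : PySem.Dict Int Int) : Int × PySem.Dict Int Int :=
  match bricks with
  | [] => (ans, memo)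
  | b :: rest =>
    -- the guard is for termination only: bricks come from range(1, min(5, w+1)) with w ≥ 1,
    -- so 1 ≤ b ∧ 1 ≤ w always holds and the else branch is unreachable
    if _h : 1 ≤ b ∧ 1 ≤ w then
      let p := pvGoA (w - b) memo
      -- `ans += count_ways_memo(width-brick, memo)`; the recursive call always returns a
      -- number here (w - b ≥ 0), so the `.getD 0` never fires
      pvLoopA w rest (ans + p.1.getD 0) p.2
    else
      pvLoopA w rest ans memo
termination_by (w.toNat, bricks.length)
decreasing_by
  · apply Prod.Lex.left; omega
  · apply Prod.Lex.right; simp only [List.length_cons]; omega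
  · apply Prod.Lex.right; simp only [List.length_cons]; omega
end

def count_ways_memo (width : Int) (memo : Option (List (Int × Int))) : Option Int :=
  (pvGoA width (PySem.Dict.ofList (memo.getD []))).1        -- `if memo is None: memo = {}`

-- ===== PORT B =====
-- the body of `for w in range(width+1)` in Source B
def pvStepB (d : PySem.Dict Int Int) (vals : List Int) (w : Int) : List Int :=
  let v : Int :=
    match d.get? w with
    | some v => v
    | none =>
      if w = 0 then 1
      else ((PySem.List.pyRange 1 (min 5 (w + 1)) 1).map
              (fun b => PySem.List.pyGetD vals (w - b) 0)).sum   -- vals[w-b]; index always in range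
  vals ++ [v]

def count_ways_memo_alt (width : Int) (memo : Option (List (Int × Int))) : Option Int :=
  let d := PySem.Dict.ofList (memo.getD [])
  match d.get? width with
  | some v => some v
  | none =>
    if width < 0 then none
    else
      let vals := (PySem.List.pyRange 0 (width + 1) 1).foldl (pvStepB d) []
      some (PySem.List.pyGetD vals width 0)                 -- vals[width]; index always in range

-- ===== PRECONDITION & SPEC =====
-- Pre_ excludes only widths above 800 that are not keys of memo: there A's depth-`width`
-- recursion can exceed CPython's default recursion limit (1000) and raise RecursionError;
-- a width listed in memo is answered by a direct lookup and stays inside Pre_.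
def Pre_count_ways_memo (width : Int) (memo : Option (List (Int × Int))) : Prop :=
  width ≤ 800 ∨ width ∈ (memo.getD []).map (·.1)
instance (width : Int) (memo : Option (List (Int × Int))) : Decidable (Pre_count_ways_memo width memo) := by unfold Pre_count_ways_memo; infer_instance
def pvWitness_count_ways_memo : Int × (Option (List (Int × Int))) := (5, none)

def Spec_count_ways_memo (width : Int) (memo : Option (List (Int × Int))) (out : Option Int) : Prop := out = count_ways_memo_alt width memo
instance (width : Int) (memo : Option (List (Int × Int))) (out : Option Int) : Decidable (Spec_count_ways_memo width memo out) := by unfold Spec_count_ways_memo; infer_instance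

-- ===== CLAIM (what is proved, stated in full; the proofs are below) =====
def Claim_equal_count_ways_memo : Prop := ∀ (width : Int) (memo : Option (List (Int × Int))), Dom_count_ways_memo width memo → Pre_count_ways_memo width memo → Spec_count_ways_memo width memo (count_ways_memo width memo)

-- ===== LEMMAS AND PROOFS =====

-- the common denotation: pvF d w is the tiling count for width w, except that widths listed
-- in the initial memo d take their value from d
def pvF (d : PySem.Dict Int Int) (w : Int) : Int :=
  match d.get? w with
  | some v => v
  | none =>
    if _h0 : w ≤ 0 then 1
    else
      pvF d (w - 1)
      + (if _h : 2 ≤ w then pvF d (w - 2) else 0)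
      + (if _h : 3 ≤ w then pvF d (w - 3) else 0)
      + (if _h : 4 ≤ w then pvF d (w - 4) else 0)
termination_by w.toNat
decreasing_by all_goals omega

lemma pvF_of_some {d : PySem.Dict Int Int} {w v : Int} (h : d.get? w = some v) : pvF d w = v := by
  rw [pvF, h]

lemma pvF_of_none_nonpos {d : PySem.Dict Int Int} {w : Int} (h : d.get? w = none)
    (hw : w ≤ 0) : pvF d w = 1 := by
  rw [pvF, h]; simp [hw]

lemma pvF_of_none_pos {d : PySem.Dict Int Int} {w : Int} (h : d.get? w = none)
    (hw : 1 ≤ w) :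
    pvF d w = pvF d (w - 1)
      + (if 2 ≤ w then pvF d (w - 2) else 0)
      + (if 3 ≤ w then pvF d (w - 3) else 0)
      + (if 4 ≤ w then pvF d (w - 4) else 0) := by
  rw [pvF, h]
  simp only [dite_eq_ite]
  rw [if_neg (by omega : ¬ w ≤ 0)]

lemma pvF_sum (d : PySem.Dict Int Int) (w : Int) (hw : 1 ≤ w) (h : d.get? w = none) :
    ((PySem.List.pyRange 1 (min 5 (w + 1)) 1).map (fun b => pvF d (w - b))).sum = pvF d w := by
  rcases (by omega : w = 1 ∨ w = 2 ∨ w = 3 ∨ 4 ≤ w) with h1 | h2 | h3 | h4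
  · subst h1
    rw [pvF_of_none_pos h (by omega)]
    rw [show PySem.List.pyRange 1 (min 5 (1 + 1)) 1 = [1] from by decide]
    norm_num
  · subst h2
    rw [pvF_of_none_pos h (by omega)]
    rw [show PySem.List.pyRange 1 (min 5 (2 + 1)) 1 = [1, 2] from by decide]
    norm_num
  · subst h3
    rw [pvF_of_none_pos h (by omega)]
    rw [show PySem.List.pyRange 1 (min 5 (3 + 1)) 1 = [1, 2, 3] from by decide]
    norm_num
    ring
  · rw [pvF_of_none_pos h (by omega)]
    rw [show min 5 (w + 1) = 5 from by omega]
    rw [show PySem.List.pyRange 1 5 1 = [1, 2, 3, 4] from by decide]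
    rw [if_pos (by omega : (2:Int) ≤ w), if_pos (by omega : (3:Int) ≤ w),
        if_pos (by omega : (4:Int) ≤ w)]
    simp only [List.map_cons, List.map_nil, List.sum_cons, List.sum_nil]
    ring

-- both ports' results equal this function of the ORIGINAL memo
def pvRes (d : PySem.Dict Int Int) (w : Int) : Option Int :=
  if 0 ≤ w ∨ (d.get? w).isSome then some (pvF d w) else none

-- invariant on A's evolving memo: every entry is either original or a correct pvF value at a
-- key absent from the original memo
def pvInv (d memo : PySem.Dict Int Int) : Prop :=
  ∀ k, memo.get? k = d.get? k ∨ (d.get? k = none ∧ 0 ≤ k ∧ memo.get? k = some (pvF d k))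

lemma pvInv_none {d memo : PySem.Dict Int Int} (hinv : pvInv d memo) {k : Int}
    (h : memo.get? k = none) : d.get? k = none := by
  rcases hinv k with h' | ⟨_, _, h'⟩
  · rw [← h']; exact h
  · rw [h] at h'; exact absurd h' (by simp)

lemma pvLoopA_spec (d : PySem.Dict Int Int) (w : Int) (hw : 1 ≤ w)
    (IH : ∀ w' memo', w'.toNat < w.toNat → pvInv d memo' →
        pvInv d (pvGoA w' memo').2 ∧ (pvGoA w' memo').1 = pvRes d w') :
    ∀ bricks ans memo, (∀ b ∈ bricks, 1 ≤ b ∧ b ≤ w) → pvInv d memo →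
      pvInv d (pvLoopA w bricks ans memo).2 ∧
      (pvLoopA w bricks ans memo).1 = ans + (bricks.map (fun b => pvF d (w - b))).sum := by
  intro bricks
  induction bricks with
  | nil => intro ans memo _ hinv; simpa [pvLoopA] using hinv
  | cons b rest ih =>
    intro ans memo hb hinv
    have hbw : 1 ≤ b ∧ b ≤ w := hb b (List.mem_cons_self)
    have hcall := IH (w - b) memo (by omega) hinv
    rw [pvLoopA]
    rw [dif_pos ⟨hbw.1, hw⟩]
    have hres : (pvGoA (w - b) memo).1 = some (pvF d (w - b)) := by
      rw [hcall.2, pvRes, if_pos (Or.inl (by omega))]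
    have := ih (ans + (pvGoA (w - b) memo).1.getD 0) (pvGoA (w - b) memo).2
      (fun b' hb' => hb b' (List.mem_cons_of_mem _ hb')) hcall.1
    refine ⟨this.1, ?_⟩
    rw [this.2, hres]
    simp only [Option.getD_some, List.map_cons, List.sum_cons]
    ring

lemma pvGoA_spec (d : PySem.Dict Int Int) :
    ∀ (n : Nat) (w : Int), w.toNat ≤ n → ∀ memo, pvInv d memo →
      pvInv d (pvGoA w memo).2 ∧ (pvGoA w memo).1 = pvRes d w := by
  have main : ∀ (n : Nat), (∀ m, m < n → ∀ (w : Int), w.toNat ≤ m → ∀ memo, pvInv d memo →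
        pvInv d (pvGoA w memo).2 ∧ (pvGoA w memo).1 = pvRes d w) →
      ∀ (w : Int), w.toNat ≤ n → ∀ memo, pvInv d memo →
        pvInv d (pvGoA w memo).2 ∧ (pvGoA w memo).1 = pvRes d w := by
    intro n ih w hwn memo hinv
    by_cases hm : (memo.get? w).isSome
    · rw [pvGoA, if_pos hm]
      refine ⟨hinv, ?_⟩
      rcases Option.isSome_iff_exists.mp hm with ⟨v, hv⟩
      rcases hinv w with h' | ⟨hd, hk, h'⟩
      · rw [hv]
        rw [hv] at h'
        rw [pvRes, if_pos (Or.inr (by rw [← h']; simp)), pvF_of_some h'.symm]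
      · rw [h', pvRes, if_pos (Or.inl hk)]
    · have hmn : memo.get? w = none := Option.not_isSome_iff_eq_none.mp hm
      have hdn : d.get? w = none := pvInv_none hinv hmn
      rw [pvGoA, if_neg hm]
      by_cases hneg : w < 0
      · rw [if_pos hneg]
        refine ⟨hinv, ?_⟩
        rw [pvRes, if_neg (by simp [hdn]; omega)]
      · rw [if_neg hneg]
        by_cases hz : w = 0
        · rw [if_pos hz]
          refine ⟨hinv, ?_⟩
          subst hz
          rw [pvRes, if_pos (Or.inl le_rfl), pvF_of_none_nonpos hdn le_rfl]
        · rw [if_neg hz]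
          have hw1 : 1 ≤ w := by omega
          have IH' : ∀ w' memo', w'.toNat < w.toNat → pvInv d memo' →
              pvInv d (pvGoA w' memo').2 ∧ (pvGoA w' memo').1 = pvRes d w' := by
            intro w' memo' hlt hinv'
            exact ih (n - 1) (by omega) w' (by omega) memo' hinv'
          have hloop := pvLoopA_spec d w hw1 IH'
            (PySem.List.pyRange 1 (min 5 (w + 1)) 1) 0 memo
            (fun b hb => by
              rw [PySem.List.mem_pyRange_one] at hb
              omega)
            hinv
          simp only []
          set p := pvLoopA w (PySem.List.pyRange 1 (min 5 (w + 1)) 1) 0 memo with hp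
          have hans : p.1 = pvF d w := by
            rw [hloop.2, zero_add, pvF_sum d w hw1 hdn]
          constructor
          · intro k
            by_cases hkw : k = w
            · subst hkw
              right
              refine ⟨hdn, by omega, ?_⟩
              rw [PySem.Dict.get?_insert_self, hans]
            · rcases hloop.1 k with h' | h'
              · left; rw [PySem.Dict.get?_insert_of_ne _ _ hkw, h']
              · right; rw [PySem.Dict.get?_insert_of_ne _ _ hkw]; exact h'
          · rw [PySem.Dict.get?_insert_self, hans, pvRes, if_pos (Or.inl (by omega))]
  intro n
  induction n using Nat.strong_induction_on with
  | _ n ih => exact main n ih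

lemma pvFoldB (d : PySem.Dict Int Int) :
    ∀ n : Nat, (PySem.List.pyRange 0 (n : Int) 1).foldl (pvStepB d) []
      = (List.range n).map (fun i => pvF d (Int.ofNat i)) := by
  intro n
  induction n with
  | zero => simp
  | succ n ih =>
    have hcast : ((n + 1 : Nat) : Int) = (n : Int) + 1 := by push_cast; ring
    rw [hcast, PySem.List.pyRange_one_succ_right (by positivity), List.foldl_append,
        List.foldl_cons, List.foldl_nil, ih, List.range_succ, List.map_append]
    rw [pvStepB]
    congr 1
    simp only [List.map_cons, List.map_nil]
    congr 1
    -- the freshly appended value equals pvF d n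
    simp only [Int.ofNat_eq_natCast]
    cases hd : d.get? (n : Int) with
    | some v => exact (pvF_of_some hd).symm
    | none =>
      simp only []
      rcases Nat.eq_zero_or_pos n with hn0 | hn1
      · subst hn0
        rw [if_pos (by norm_num : ((0:Nat) : Int) = 0), pvF_of_none_nonpos hd le_rfl]
      · rw [if_neg (by omega : ¬ ((n : Int) = 0))]
        rw [← pvF_sum d (n : Int) (by omega) hd]
        congr 1
        apply List.map_congr_left
        intro b hb
        rw [PySem.List.mem_pyRange_one] at hb
        have hb2 : 0 ≤ (n : Int) - b ∧ (n : Int) - b < n := by omega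
        rw [PySem.List.pyGetD_eq_getElem _ _ hb2.1
          (by simp only [List.length_map, List.length_range]; omega)]
        rw [List.getElem_map, List.getElem_range]
        congr 1
        omega

lemma alt_eq_res (width : Int) (memo : Option (List (Int × Int))) :
    count_ways_memo_alt width memo = pvRes (PySem.Dict.ofList (memo.getD [])) width := by
  rw [count_ways_memo_alt]
  simp only []
  set d := PySem.Dict.ofList (memo.getD []) with hd
  cases hg : d.get? width with
  | some v => rw [pvRes, if_pos (Or.inr (by simp [hg])), pvF_of_some hg]
  | none =>
    by_cases hneg : width < 0
    · rw [if_pos hneg, pvRes, if_neg (by simp [hg]; omega)]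
    · rw [if_neg hneg, pvRes, if_pos (Or.inl (by omega))]
      rw [show width + 1 = ((width + 1).toNat : Int) from by omega, pvFoldB]
      rw [PySem.List.pyGetD_eq_getElem _ _ (by omega : (0:Int) ≤ width)
        (by simp only [List.length_map, List.length_range]; omega)]
      rw [List.getElem_map, List.getElem_range]
      simp only [Int.ofNat_eq_natCast]
      rw [Int.toNat_of_nonneg (by omega)]

-- ===== VERDICT (by name: the statement is the Claim_ definition above) =====
theorem count_ways_memo_spec : Claim_equal_count_ways_memo := by
  intro width memo _ _
  unfold Spec_count_ways_memo
  rw [alt_eq_res]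
  unfold count_ways_memo
  exact (pvGoA_spec _ width.toNat width le_rfl _ (fun k => Or.inl rfl)).2
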